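-- pv_equiv track=rewrite | github.com/Monkeyshoulder1/uasalgo | 2024-SIWP1001-Final-Project-main/arrays/floyd.py | floyd_cycle_detection
-- ===== SOURCE A (Python) =====
-- def floyd_cycle_detection(arr):
--     """
--     Detect cycle in an array using Floyd's algorithm
--
--     Args:
--         arr (List[int]): Input array
--
--     Returns:
--         int or None: Cycle start element, or None if no cycle
--     """
--     # Find the intersection point of the two pointers
--     tortoise = arr[0]
--     hare = arr[0]
--
--     while True:
--         tortoise = arr[tortoise]
--         hare = arr[arr[hare]]
--
--         if tortoise == hare:
--             break
--
--     # Find the entrance to the cycle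
--     tortoise = arr[0]
--     while tortoise != hare:
--         tortoise = arr[tortoise]
--         hare = arr[hare]
--
--     return tortoise
-- ===== SOURCE B (Python) =====
-- def floyd_cycle_detection(arr):
--     """Single forward walk with a visited set: the first value seen twice
--     is the cycle entrance, exactly what Floyd's two-phase loops return."""
--     cur = arr[0]
--     seen = set()
--     while cur not in seen:
--         seen.add(cur)
--         cur = arr[cur]
--     return cur
-- ===== Notes on version B (the rewrite author's own statement) =====
-- stated objective: simpler
-- what changed: Replaces Floyd's two-phase tortoise/hare pointer chase with a single forward walk keeping a visited set and returning the first value seen twice (the cycle entrance).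
-- outside the precondition, e.g. on floyd_cycle_detection([1, 1, 99]): A returns 1, B returns 1
import Mathlib
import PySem

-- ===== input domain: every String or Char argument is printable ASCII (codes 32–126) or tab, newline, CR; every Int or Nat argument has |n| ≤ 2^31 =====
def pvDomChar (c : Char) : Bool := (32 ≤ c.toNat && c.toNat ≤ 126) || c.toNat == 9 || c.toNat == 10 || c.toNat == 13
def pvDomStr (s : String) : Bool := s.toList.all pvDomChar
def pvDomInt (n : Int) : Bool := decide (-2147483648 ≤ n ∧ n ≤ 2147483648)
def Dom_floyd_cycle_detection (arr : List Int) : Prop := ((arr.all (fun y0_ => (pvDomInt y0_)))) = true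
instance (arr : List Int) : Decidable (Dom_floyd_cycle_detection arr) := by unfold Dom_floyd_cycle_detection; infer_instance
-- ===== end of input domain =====

-- B replaces Floyd's two-phase tortoise/hare loops with a single forward walk that keeps a
-- visited set and returns the first value seen twice (simpler; same asymptotic step count).

-- ===== PORT A =====
-- phase 1: 'while True: tortoise = arr[tortoise]; hare = arr[arr[hare]]; if tortoise == hare: break'
-- fuel only makes the loop total; under Pre_ it is ample; none = IndexError or fuel exhaustion (junk, outside the claim)
def floydPhase1 (arr : List Int) : Nat → Int → Int → Option Int
  | 0, _, _ => none
  | fuel + 1, tortoise, hare =>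
    match PySem.List.pyGet? arr tortoise with
    | none => none
    | some t =>
      match PySem.List.pyGet? arr hare with
      | none => none
      | some h1 =>
        match PySem.List.pyGet? arr h1 with
        | none => none
        | some h => if t = h then some h else floydPhase1 arr fuel t h

-- phase 2: 'while tortoise != hare: tortoise = arr[tortoise]; hare = arr[hare]; return tortoise'
def floydPhase2 (arr : List Int) : Nat → Int → Int → Int
  | 0, tortoise, hare => if tortoise = hare then tortoise else 0
  | fuel + 1, tortoise, hare =>
    if tortoise = hare then tortoise
    else
      match PySem.List.pyGet? arr tortoise, PySem.List.pyGet? arr hare with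
      | some t, some h => floydPhase2 arr fuel t h
      | _, _ => 0

def floyd_cycle_detection (arr : List Int) : Int :=
  match PySem.List.pyGet? arr 0 with
  | none => 0
  | some s =>
    match floydPhase1 arr (arr.length + 1) s s with
    | none => 0
    | some hare => floydPhase2 arr (arr.length + 1) s hare

-- ===== PORT B =====
-- 'while cur not in seen: seen.add(cur); cur = arr[cur]; return cur' (fuel makes it total)
def bWalk (arr : List Int) : Nat → PySem.Set Int → Int → Int
  | 0, _, _ => 0
  | fuel + 1, seen, cur =>
    if PySem.Set.contains seen cur then cur
    else
      match PySem.List.pyGet? arr cur with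
      | some nxt => bWalk arr fuel (PySem.Set.add seen cur) nxt
      | none => 0

def floyd_cycle_detection_alt (arr : List Int) : Int :=
  match PySem.List.pyGet? arr 0 with
  | none => 0
  | some cur => bWalk arr (arr.length + 1) PySem.Set.empty cur

-- ===== PRECONDITION & SPEC =====
-- Pre_ requires every ENTRY of arr to be a valid (possibly negative) Python index into arr:
-- then both walks stay in range and A provably terminates. On most excluded inputs A raises
-- IndexError; A can also return when the out-of-range entries happen to be unreachable from
-- the walk (the reachable-only condition is not closed-form), e.g. [1, 1, 99].
def Pre_floyd_cycle_detection (arr : List Int) : Prop :=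
  arr ≠ [] ∧ ∀ v ∈ arr, -(arr.length : Int) ≤ v ∧ v < (arr.length : Int)
instance (arr : List Int) : Decidable (Pre_floyd_cycle_detection arr) := by
  unfold Pre_floyd_cycle_detection; infer_instance

def pvWitness_floyd_cycle_detection : List Int := [1, 0]

def Spec_floyd_cycle_detection (arr : List Int) (out : Int) : Prop := out = floyd_cycle_detection_alt arr
instance (arr : List Int) (out : Int) : Decidable (Spec_floyd_cycle_detection arr out) := by unfold Spec_floyd_cycle_detection; infer_instance

-- ===== CLAIM (what is proved, stated in full; the proofs are below) =====
def Claim_equal_floyd_cycle_detection : Prop := ∀ (arr : List Int), Dom_floyd_cycle_detection arr → Pre_floyd_cycle_detection arr → Spec_floyd_cycle_detection arr (floyd_cycle_detection arr)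

-- ===== LEMMAS AND PROOFS =====

-- the step function and the orbit of arr[0] under v ↦ arr[v]
def fStep (arr : List Int) (v : Int) : Int := PySem.List.pyGetD arr v 0
def orb (arr : List Int) (t : Nat) : Int := (fStep arr)^[t] (PySem.List.pyGetD arr 0 0)

-- normal form of an index in an eventually-periodic orbit with tail μ and period lam
def rho (μ lam t : Nat) : Nat := if t < μ then t else μ + (t - μ) % lam

lemma orb_succ (arr : List Int) (t : Nat) : orb arr (t + 1) = fStep arr (orb arr t) := by
  simp [orb, Function.iterate_succ_apply']

lemma orb_mem (arr : List Int) (hp : Pre_floyd_cycle_detection arr) (t : Nat) :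
    orb arr t ∈ arr := by
  induction t with
  | zero =>
    simp only [orb, Function.iterate_zero, id]
    exact PySem.List.pyGetD_mem _ _ (by
      rcases arr with _ | ⟨a, l⟩
      · exact absurd rfl hp.1
      · simp [PySem.Raise.InRange])
  | succ t ih =>
    rw [orb_succ]
    exact PySem.List.pyGetD_mem _ _ (by
      have := hp.2 _ ih
      simp [PySem.Raise.InRange]; omega)

lemma orb_get (arr : List Int) (hp : Pre_floyd_cycle_detection arr) (t : Nat) :
    PySem.List.pyGet? arr (orb arr t) = some (orb arr (t + 1)) := by
  have hm := orb_mem arr hp t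
  have hin : PySem.Raise.InRange arr.length (orb arr t) := by
    have := hp.2 _ hm
    simp [PySem.Raise.InRange]; omega
  rcases h : PySem.List.pyGet? arr (orb arr t) with _ | x
  · rw [PySem.List.pyGet?_eq_none_iff] at h
    exact absurd hin h
  · rw [orb_succ]
    have : fStep arr (orb arr t) = x := by
      simp [fStep, PySem.List.pyGetD, h]
    rw [this]

lemma orb_zero_get (arr : List Int) (hp : Pre_floyd_cycle_detection arr) :
    PySem.List.pyGet? arr 0 = some (orb arr 0) := by
  rcases arr with _ | ⟨a, l⟩
  · exact absurd rfl hp.1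
  · simp [orb, PySem.List.pyGetD_zero_cons]

lemma orb_shift (arr : List Int) (a b : Nat) (h : orb arr a = orb arr b) (d : Nat) :
    orb arr (a + d) = orb arr (b + d) := by
  simp only [orb, add_comm _ d, Function.iterate_add_apply]
  simp only [orb] at h
  rw [h]

-- existence of tail/period data: pigeonhole on the orbit (all values lie in arr)
lemma exists_mu_lam (arr : List Int) (hp : Pre_floyd_cycle_detection arr) :
    ∃ μ lam : Nat, 0 < lam ∧ μ + lam ≤ arr.length ∧
      orb arr (μ + lam) = orb arr μ ∧
      ∀ i j, i < μ + lam → j < μ + lam → orb arr i = orb arr j → i = j := by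
  classical
  have hmapsto : ∀ t ∈ Finset.range (arr.length + 1), orb arr t ∈ arr.toFinset := by
    intro t _; simpa using orb_mem arr hp t
  have hcard : arr.toFinset.card < (Finset.range (arr.length + 1)).card := by
    have := arr.toFinset_card_le
    simp only [Finset.card_range]; omega
  obtain ⟨i, hi, j, hj, hne, heq⟩ :=
    Finset.exists_ne_map_eq_of_card_lt_of_maps_to hcard hmapsto
  simp only [Finset.mem_range] at hi hj
  have hex : ∃ r : Nat, ∃ i' : Nat, i' < r ∧ orb arr i' = orb arr r := by
    rcases Nat.lt_or_ge i j with h | h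
    · exact ⟨j, i, h, heq⟩
    · exact ⟨i, j, by omega, heq.symm⟩
  set R := Nat.find hex with hR
  obtain ⟨i0, hi0R, hi0⟩ := Nat.find_spec hex
  refine ⟨i0, R - i0, by omega, ?_, ?_, ?_⟩
  · -- R ≤ arr.length, hence i0 + (R - i0) = R ≤ n
    have hRle : R ≤ max i j := by
      apply Nat.find_le
      rcases Nat.lt_or_ge i j with h | h
      · exact ⟨i, by omega, by simpa [Nat.max_eq_right (Nat.le_of_lt h)] using heq⟩
      · exact ⟨j, by omega, by simpa [Nat.max_eq_left h] using heq.symm⟩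
    omega
  · have : i0 + (R - i0) = R := by omega
    rw [this]; exact hi0.symm
  · intro a b ha hb hab
    have hR' : i0 + (R - i0) = R := by omega
    rw [hR'] at ha hb
    by_contra hne'
    rcases Nat.lt_or_ge a b with h | h
    · have : R ≤ b := Nat.find_le ⟨a, h, hab⟩
      omega
    · have h' : b < a := by omega
      have : R ≤ a := Nat.find_le ⟨b, h', hab.symm⟩
      omega

-- ρ is the canonical representative below μ + lam
lemma rho_lt (μ lam t : Nat) (hlam : 0 < lam) : rho μ lam t < μ + lam := by
  unfold rho; split_ifs with h
  · omega
  · have := Nat.mod_lt (t - μ) hlam; omega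

lemma orb_rho (arr : List Int) (μ lam : Nat) (hlam : 0 < lam)
    (hper : orb arr (μ + lam) = orb arr μ) (t : Nat) :
    orb arr t = orb arr (rho μ lam t) := by
  induction t using Nat.strong_induction_on with
  | _ t ih =>
    by_cases h : t < μ + lam
    · unfold rho; split_ifs with h1
      · rfl
      · have : (t - μ) % lam = t - μ := Nat.mod_eq_of_lt (by omega)
        rw [this]; congr 1; omega
    · -- t ≥ μ + lam : o t = o (t - lam), same rho
      have h1 : orb arr t = orb arr (t - lam) := by
        have := orb_shift arr (μ + lam) μ hper (t - lam - μ)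
        have e1 : μ + lam + (t - lam - μ) = t := by omega
        have e2 : μ + (t - lam - μ) = t - lam := by omega
        rw [e1, e2] at this; exact this
      have h2 : rho μ lam t = rho μ lam (t - lam) := by
        unfold rho
        have hn1 : ¬ t < μ := by omega
        have hn2 : ¬ t - lam < μ := by omega
        rw [if_neg hn1, if_neg hn2]
        have : t - μ = lam + (t - lam - μ) := by omega
        rw [this, Nat.add_mod_left]
      rw [h1, h2]
      exact ih (t - lam) (by omega)

lemma orb_eq_iff (arr : List Int) (μ lam : Nat) (hlam : 0 < lam)
    (hper : orb arr (μ + lam) = orb arr μ)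
    (hinj : ∀ i j, i < μ + lam → j < μ + lam → orb arr i = orb arr j → i = j)
    (a b : Nat) : orb arr a = orb arr b ↔ rho μ lam a = rho μ lam b := by
  constructor
  · intro h
    apply hinj _ _ (rho_lt _ _ _ hlam) (rho_lt _ _ _ hlam)
    rw [← orb_rho arr μ lam hlam hper, ← orb_rho arr μ lam hlam hper]
    exact h
  · intro h
    rw [orb_rho arr μ lam hlam hper a, orb_rho arr μ lam hlam hper b, h]

-- arithmetic characterisation of the phase-1 meeting condition ρ(k) = ρ(2k)
lemma rho_meet_mp (μ lam k : Nat) (hlam : 0 < lam) (hk : 0 < k)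
    (h : rho μ lam k = rho μ lam (2 * k)) : μ ≤ k ∧ k % lam = 0 := by
  unfold rho at h
  split_ifs at h with h1 h2 h2
  · omega
  · have := Nat.mod_lt (2 * k - μ) hlam; omega
  · have := Nat.mod_lt (k - μ) hlam; omega
  · -- μ ≤ k and μ ≤ 2k : (k-μ) ≡ (2k-μ) [MOD lam] ⇒ lam ∣ k
    refine ⟨by omega, ?_⟩
    have hmod : (k - μ) % lam = (2 * k - μ) % lam := by omega
    have : (2 * k - μ) = (k - μ) + k := by omega
    rw [this] at hmod
    have h2 : (k - μ + k) % lam = ((k - μ) % lam + k % lam) % lam := Nat.add_mod _ _ _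
    have h3 : (k - μ) % lam < lam := Nat.mod_lt _ hlam
    -- from (k-μ)%lam = ((k-μ)%lam + k%lam)%lam deduce k%lam = 0
    have h4 : ((k - μ) % lam + k % lam) % lam = (k - μ) % lam := by omega
    have h5 : k % lam < lam := Nat.mod_lt _ hlam
    rcases Nat.lt_or_ge ((k - μ) % lam + k % lam) lam with hlt | hge
    · rw [Nat.mod_eq_of_lt hlt] at h4; omega
    · have : (k - μ) % lam + k % lam - lam < lam := by omega
      have h6 : ((k - μ) % lam + k % lam) % lam = (k - μ) % lam + k % lam - lam := by
        rw [Nat.mod_eq_sub_mod hge, Nat.mod_eq_of_lt this]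
      omega

lemma rho_meet_mpr (μ lam k : Nat) (_hlam : 0 < lam) (hμ : μ ≤ k) (hd : k % lam = 0) :
    rho μ lam k = rho μ lam (2 * k) := by
  unfold rho
  have hn1 : ¬ k < μ := by omega
  rcases Nat.eq_zero_or_pos k with rfl | hk
  · simp
  · have hn2 : ¬ 2 * k < μ := by omega
    rw [if_neg hn1, if_neg hn2]
    have : 2 * k - μ = (k - μ) + k := by omega
    rw [this]
    obtain ⟨c, hc⟩ := Nat.dvd_of_mod_eq_zero hd
    rw [hc, Nat.add_mul_mod_self_left]

-- ===== phase-1 loop =====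
lemma floydPhase1_spec (arr : List Int) (hp : Pre_floyd_cycle_detection arr)
    (M : Nat) (hM : 0 < M ∧ orb arr M = orb arr (2 * M))
    (hMmin : ∀ k, 0 < k → orb arr k = orb arr (2 * k) → M ≤ k) :
    ∀ fuel j, j < M → M ≤ j + fuel →
      floydPhase1 arr fuel (orb arr j) (orb arr (2 * j)) = some (orb arr (2 * M)) := by
  intro fuel
  induction fuel with
  | zero => intro j h1 h2; omega
  | succ fuel ih =>
    intro j h1 h2
    unfold floydPhase1
    simp only [orb_get arr hp j, orb_get arr hp (2 * j), orb_get arr hp (2 * j + 1)]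
    by_cases heq : orb arr (j + 1) = orb arr (2 * j + 1 + 1)
    · have hMle : M ≤ j + 1 := by
        apply hMmin (j + 1) (by omega)
        have : 2 * (j + 1) = 2 * j + 1 + 1 := by omega
        rw [this]; exact heq
      have hMj : M = j + 1 := by omega
      simp only [if_pos heq]
      have e2 : 2 * j + 1 + 1 = 2 * (j + 1) := by omega
      rw [e2, ← hMj]
    · simp only [if_neg heq]
      have h3 : j + 1 < M := by
        rcases Nat.lt_or_ge (j + 1) M with h | h
        · exact h
        · exfalso
          have hMj : M = j + 1 := by omega
          apply heq
          have e : 2 * j + 1 + 1 = 2 * (j + 1) := by omega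
          rw [e, ← hMj]
          exact hM.2
      have e : 2 * j + 1 + 1 = 2 * (j + 1) := by omega
      rw [e]
      exact ih (j + 1) h3 (by omega)

-- ===== phase-2 loop =====
lemma floydPhase2_spec (arr : List Int) (hp : Pre_floyd_cycle_detection arr)
    (μ lam M : Nat) (hlam : 0 < lam)
    (hper : orb arr (μ + lam) = orb arr μ)
    (hinj : ∀ i j, i < μ + lam → j < μ + lam → orb arr i = orb arr j → i = j)
    (hμM : μ ≤ M) (hMmod : M % lam = 0) (hMpos : 0 < M) :
    ∀ fuel t, t ≤ μ → μ ≤ t + fuel →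
      floydPhase2 arr fuel (orb arr t) (orb arr (2 * M + t)) = orb arr μ := by
  have key : ∀ t, t ≤ μ → (orb arr t = orb arr (2 * M + t) ↔ t = μ) := by
    intro t ht
    rw [orb_eq_iff arr μ lam hlam hper hinj]
    constructor
    · intro h
      unfold rho at h
      split_ifs at h with h1 h2 h2
      · omega
      · have := Nat.mod_lt (2 * M + t - μ) hlam; omega
      · omega
      · omega
    · intro h; rw [h]
      unfold rho
      have hn1 : ¬ μ < μ := by omega
      have hn2 : ¬ 2 * M + μ < μ := by omega
      rw [if_neg hn1, if_neg hn2]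
      have e : 2 * M + μ - μ = 2 * M := by omega
      rw [e, Nat.sub_self, Nat.zero_mod]
      obtain ⟨c, hc⟩ := Nat.dvd_of_mod_eq_zero hMmod
      rw [hc]
      have : 2 * (lam * c) = lam * (2 * c) := by ring
      rw [this, Nat.mul_mod_right]
  intro fuel
  induction fuel with
  | zero =>
    intro t h1 h2
    have ht : t = μ := by omega
    unfold floydPhase2
    rw [if_pos ((key t h1).mpr ht), ht]
  | succ fuel ih =>
    intro t h1 h2
    unfold floydPhase2
    by_cases heq : orb arr t = orb arr (2 * M + t)
    · rw [if_pos heq]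
      have := (key t h1).mp heq
      rw [this]
    · rw [if_neg heq]
      have ht : t < μ := by
        rcases Nat.lt_or_ge t μ with h | h
        · exact h
        · exfalso; exact heq ((key t h1).mpr (by omega))
      rw [orb_get arr hp t, orb_get arr hp (2 * M + t)]
      have e : 2 * M + t + 1 = 2 * M + (t + 1) := by omega
      rw [e]
      exact ih (t + 1) (by omega) (by omega)

-- ===== B's walk =====
lemma bWalk_spec (arr : List Int) (hp : Pre_floyd_cycle_detection arr)
    (μ lam : Nat) (hlam : 0 < lam)
    (hper : orb arr (μ + lam) = orb arr μ)
    (hinj : ∀ i j, i < μ + lam → j < μ + lam → orb arr i = orb arr j → i = j) :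
    ∀ fuel t (seen : PySem.Set Int), t ≤ μ + lam → μ + lam < t + fuel →
      (∀ x, x ∈ seen ↔ ∃ i, i < t ∧ orb arr i = x) →
      bWalk arr fuel seen (orb arr t) = orb arr μ := by
  intro fuel
  induction fuel with
  | zero => intro t seen h1 h2 _; omega
  | succ fuel ih =>
    intro t seen h1 h2 hseen
    unfold bWalk
    by_cases hmem : orb arr t ∈ seen
    · rw [if_pos (by rw [PySem.Set.contains_iff]; exact hmem)]
      obtain ⟨i, hit, hio⟩ := (hseen _).mp hmem
      -- a repeat can only happen at t = μ + lam, and the value there is orb μ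
      have ht : t = μ + lam := by
        rcases Nat.lt_or_ge t (μ + lam) with h | h
        · exfalso
          have := hinj i t (by omega) h hio
          omega
        · omega
      subst ht
      exact hper
    · rw [if_neg (by rw [PySem.Set.contains_iff]; exact hmem)]
      have ht : t < μ + lam := by
        rcases Nat.lt_or_ge t (μ + lam) with h | h
        · exact h
        · exfalso
          apply hmem
          rw [hseen]
          exact ⟨μ, by omega, by rw [← hper]; congr 1; omega⟩
      rw [orb_get arr hp t]
      apply ih (t + 1) _ (by omega) (by omega)
      intro x
      rw [PySem.Set.mem_add, hseen]
      constructor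
      · rintro (⟨i, hi, ho⟩ | h)
        · exact ⟨i, by omega, ho⟩
        · exact ⟨t, by omega, h.symm⟩
      · rintro ⟨i, hi, ho⟩
        rcases Nat.lt_or_ge i t with h | h
        · exact Or.inl ⟨i, h, ho⟩
        · have : i = t := by omega
          subst this; exact Or.inr ho.symm

-- ===== tying it together =====
lemma floyd_eq (arr : List Int) (hp : Pre_floyd_cycle_detection arr) :
    floyd_cycle_detection arr = floyd_cycle_detection_alt arr := by
  classical
  obtain ⟨μ, lam, hlam, hbound, hper, hinj⟩ := exists_mu_lam arr hp
  -- the canonical phase-1 meeting candidate K = lam * (μ/lam + 1)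
  set K := lam * (μ / lam + 1) with hKdef
  have hKeq : K = lam * (μ / lam) + lam := by rw [hKdef, Nat.mul_succ]
  have hdm := Nat.div_add_mod μ lam
  have hml := Nat.mod_lt μ hlam
  have hKfacts : 0 < K ∧ μ ≤ K ∧ K ≤ μ + lam := by
    generalize hq : lam * (μ / lam) = q at hdm hKeq
    omega
  have hKmod : K % lam = 0 := by rw [hKdef]; exact Nat.mul_mod_right _ _
  have hKmeet : 0 < K ∧ orb arr K = orb arr (2 * K) := by
    refine ⟨hKfacts.1, ?_⟩
    rw [orb_eq_iff arr μ lam hlam hper hinj]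
    exact rho_meet_mpr μ lam K hlam hKfacts.2.1 hKmod
  have hmeet_ex : ∃ k, 0 < k ∧ orb arr k = orb arr (2 * k) := ⟨K, hKmeet⟩
  set M := Nat.find hmeet_ex with hMdef
  have hMspec : 0 < M ∧ orb arr M = orb arr (2 * M) := Nat.find_spec hmeet_ex
  have hMmin : ∀ k, 0 < k → orb arr k = orb arr (2 * k) → M ≤ k :=
    fun k h1 h2 => Nat.find_le ⟨h1, h2⟩
  have hMle : M ≤ μ + lam := le_trans (Nat.find_le hKmeet) hKfacts.2.2
  obtain ⟨hμM, hMmod⟩ := rho_meet_mp μ lam M hlam hMspec.1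
    ((orb_eq_iff arr μ lam hlam hper hinj M (2 * M)).mp hMspec.2)
  -- evaluate both sides
  have h1 : floydPhase1 arr (arr.length + 1) (orb arr 0) (orb arr 0) = some (orb arr (2 * M)) := by
    have := floydPhase1_spec arr hp M hMspec hMmin (arr.length + 1) 0 (by omega) (by omega)
    simpa using this
  have h2 : floydPhase2 arr (arr.length + 1) (orb arr 0) (orb arr (2 * M)) = orb arr μ := by
    have := floydPhase2_spec arr hp μ lam M hlam hper hinj hμM hMmod hMspec.1 (arr.length + 1) 0
      (by omega) (by omega)
    simpa using this
  have h3 : bWalk arr (arr.length + 1) PySem.Set.empty (orb arr 0) = orb arr μ := by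
    apply bWalk_spec arr hp μ lam hlam hper hinj (arr.length + 1) 0 PySem.Set.empty
      (by omega) (by omega)
    intro x
    simp [PySem.Set.empty]
  unfold floyd_cycle_detection floyd_cycle_detection_alt
  simp only [orb_zero_get arr hp, h1, h2, h3]

-- ===== VERDICT (by name: the statement is the Claim_ definition above) =====
theorem floyd_cycle_detection_spec : Claim_equal_floyd_cycle_detection := by
  intro arr _ hp
  unfold Spec_floyd_cycle_detection
  exact floyd_eq arr hp
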